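-- pv_equiv track=rewrite | github.com/Fenriz1349/Lotopython | lotopython/fonctions.py | EuroMoinsRecurent
-- ===== SOURCE A (Python) =====
-- def EuroMoinsRecurent(dicoOccu,dicoEtoile):
--     dicoOccurencesMoins=dict(sorted(dicoOccu.items(), key=lambda item:item[1])).copy()
--     dicoEtoile=dict(sorted(dicoEtoile.items(), key=lambda item:item[1])).copy()
--     liste=[]
--     for i in dicoOccurencesMoins.keys():
--         if len(liste)<5:
--             liste.append(i)
--         else :break
--     etoile=[]
--     for i in dicoEtoile.keys():
--         if len(etoile)<2:
--             etoile.append(i)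
--         else :break
--     return liste+etoile
-- ===== SOURCE B (Python) =====
-- def EuroMoinsRecurent(dicoOccu, dicoEtoile):
--     def pick(dico, k):
--         rest = list(dico.items())
--         chosen = []
--         while rest and len(chosen) < k:
--             best = min(rest, key=lambda p: p[1])
--             chosen.append(best[0])
--             rest.remove(best)
--         return chosen
--     return pick(dicoOccu, 5) + pick(dicoEtoile, 2)
-- ===== Notes on version B (the rewrite author's own statement) =====
-- stated objective: alternative
-- what changed: Replaces the full stable sort of each dict followed by a truncating key loop with bounded repeated selection: up to 5 (resp. 2) times take the first value-minimal item out of a working copy and delete it, so the dicts are never fully sorted.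
import Mathlib
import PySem

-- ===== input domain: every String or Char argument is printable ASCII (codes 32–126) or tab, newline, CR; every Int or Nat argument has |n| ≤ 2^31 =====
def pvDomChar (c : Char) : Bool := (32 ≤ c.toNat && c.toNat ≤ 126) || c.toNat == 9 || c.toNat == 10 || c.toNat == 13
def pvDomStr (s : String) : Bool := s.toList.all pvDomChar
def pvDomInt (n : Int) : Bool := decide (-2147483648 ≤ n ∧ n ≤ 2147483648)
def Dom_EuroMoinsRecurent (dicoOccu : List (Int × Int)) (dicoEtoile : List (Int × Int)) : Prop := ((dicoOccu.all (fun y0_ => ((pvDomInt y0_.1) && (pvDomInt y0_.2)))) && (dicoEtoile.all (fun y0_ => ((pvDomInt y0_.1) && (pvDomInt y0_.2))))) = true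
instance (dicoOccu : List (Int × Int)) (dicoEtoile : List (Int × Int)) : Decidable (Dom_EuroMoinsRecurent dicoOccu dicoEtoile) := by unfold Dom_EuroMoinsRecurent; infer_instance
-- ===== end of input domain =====

-- B replaces sorting each whole dict and truncating with bounded repeated first-min selection
-- from a working copy (alternative decomposition; same results, dicts never fully sorted).


-- ===== PORT A =====
-- the 'for i in d.keys(): if len(liste)<5: liste.append(i) else: break' loop, literally
def pvLoopA (limit : Nat) : List Int → List Int → List Int
  | [], acc => acc
  | i :: rest, acc => if acc.length < limit then pvLoopA limit rest (acc ++ [i]) else acc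

-- dict parameters are assoc lists under the type convention; dict() semantics = PySem.Dict.ofList
def EuroMoinsRecurent (dicoOccu : List (Int × Int)) (dicoEtoile : List (Int × Int)) : List Int :=
  -- dicoOccurencesMoins = dict(sorted(dicoOccu.items(), key=lambda item: item[1])).copy()
  let dicoOccurencesMoins :=
    PySem.Dict.ofList (PySem.List.sorted (PySem.Dict.ofList dicoOccu).items (fun item => item.2))
  -- dicoEtoile = dict(sorted(dicoEtoile.items(), key=lambda item: item[1])).copy()
  let dicoEtoile2 :=
    PySem.Dict.ofList (PySem.List.sorted (PySem.Dict.ofList dicoEtoile).items (fun item => item.2))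
  let liste := pvLoopA 5 dicoOccurencesMoins.keys []
  let etoile := pvLoopA 2 dicoEtoile2.keys []
  liste ++ etoile

-- ===== PORT B =====
-- 'while rest and len(chosen) < k: best = min(rest, key=...); chosen.append(best[0]); rest.remove(best)'
-- (len(chosen) grows by one per iteration, so k is the loop's fuel)
def pvPick : Nat → List (Int × Int) → List Int
  | 0, _ => []
  | _ + 1, [] => []
  | k + 1, p :: rest =>
    match PySem.List.min? (p :: rest) (fun q => q.2) with
    | none => []  -- unreachable: min? of a nonempty list is some
    | some best => best.1 :: pvPick k ((p :: rest).erase best)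

def EuroMoinsRecurent_alt (dicoOccu : List (Int × Int)) (dicoEtoile : List (Int × Int)) : List Int :=
  pvPick 5 (PySem.Dict.ofList dicoOccu).items ++ pvPick 2 (PySem.Dict.ofList dicoEtoile).items

-- ===== PRECONDITION & SPEC =====
def Spec_EuroMoinsRecurent (dicoOccu : List (Int × Int)) (dicoEtoile : List (Int × Int)) (out : List Int) : Prop := out = EuroMoinsRecurent_alt dicoOccu dicoEtoile
instance (dicoOccu : List (Int × Int)) (dicoEtoile : List (Int × Int)) (out : List Int) : Decidable (Spec_EuroMoinsRecurent dicoOccu dicoEtoile out) := by unfold Spec_EuroMoinsRecurent; infer_instance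

-- ===== CLAIM (what is proved, stated in full; the proofs are below) =====
def Claim_equal_EuroMoinsRecurent : Prop := ∀ (dicoOccu : List (Int × Int)) (dicoEtoile : List (Int × Int)), Dom_EuroMoinsRecurent dicoOccu dicoEtoile → Spec_EuroMoinsRecurent dicoOccu dicoEtoile (EuroMoinsRecurent dicoOccu dicoEtoile)

-- ===== LEMMAS AND PROOFS =====

-- shorthand for the comparison the stable sort uses
def pvBef (a b : Int × Int) : Bool := decide (a.2 < b.2)

-- inserting a strictly smaller element commutes with inserting a larger one
theorem pvIns_comm (m y : Int × Int) (h : m.2 < y.2) (acc : List (Int × Int)) :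
    PySem.List.insertBy pvBef m (PySem.List.insertBy pvBef y acc)
      = PySem.List.insertBy pvBef y (PySem.List.insertBy pvBef m acc) := by
  induction acc with
  | nil => simp [PySem.List.insertBy, pvBef, h, not_lt.mpr (le_of_lt h)]
  | cons z zs ih =>
    by_cases hyz : y.2 < z.2
    · have hmz : m.2 < z.2 := lt_trans h hyz
      simp [PySem.List.insertBy, pvBef, hyz, hmz, h, not_lt.mpr (le_of_lt h)]
    · by_cases hmz : m.2 < z.2
      · simp [PySem.List.insertBy, pvBef, hyz, hmz, not_lt.mpr (le_of_lt h)]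
      · simp [PySem.List.insertBy, pvBef, hyz, hmz, ih]

theorem pvIns_hoist (m : Int × Int) (l : List (Int × Int)) (h : ∀ y ∈ l, m.2 < y.2) :
    ∀ acc : List (Int × Int),
      PySem.List.insertBy pvBef m (l.foldl (fun acc x => PySem.List.insertBy pvBef x acc) acc)
        = l.foldl (fun acc x => PySem.List.insertBy pvBef x acc) (PySem.List.insertBy pvBef m acc) := by
  induction l with
  | nil => intro acc; simp
  | cons y t ih =>
    intro acc
    have hy : m.2 < y.2 := h y (by simp)
    calc PySem.List.insertBy pvBef m ((y :: t).foldl (fun acc x => PySem.List.insertBy pvBef x acc) acc)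
        = PySem.List.insertBy pvBef m (t.foldl (fun acc x => PySem.List.insertBy pvBef x acc) (PySem.List.insertBy pvBef y acc)) := by simp [List.foldl_cons]
      _ = t.foldl (fun acc x => PySem.List.insertBy pvBef x acc) (PySem.List.insertBy pvBef m (PySem.List.insertBy pvBef y acc)) := ih (fun z hz => h z (by simp [hz])) _
      _ = t.foldl (fun acc x => PySem.List.insertBy pvBef x acc) (PySem.List.insertBy pvBef y (PySem.List.insertBy pvBef m acc)) := by rw [pvIns_comm m y hy]
      _ = (y :: t).foldl (fun acc x => PySem.List.insertBy pvBef x acc) (PySem.List.insertBy pvBef m acc) := by simp [List.foldl_cons]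

theorem pvFold_head (m : Int × Int) (r : List (Int × Int)) (h : ∀ y ∈ r, m.2 ≤ y.2) :
    ∀ acc : List (Int × Int),
      r.foldl (fun acc x => PySem.List.insertBy pvBef x acc) (m :: acc)
        = m :: r.foldl (fun acc x => PySem.List.insertBy pvBef x acc) acc := by
  induction r with
  | nil => intro acc; simp
  | cons y t ih =>
    intro acc
    have hy : ¬ (y.2 < m.2) := not_lt.mpr (h y (by simp))
    have : PySem.List.insertBy pvBef y (m :: acc) = m :: PySem.List.insertBy pvBef y acc := by
      simp [PySem.List.insertBy, pvBef, hy]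
    simp only [List.foldl_cons, this]
    exact ih (fun z hz => h z (by simp [hz])) _

theorem pvSorted_cons_min (m : Int × Int) (t : List (Int × Int)) (h : ∀ y ∈ t, m.2 ≤ y.2) :
    PySem.List.sorted (m :: t) (fun p => p.2) = m :: PySem.List.sorted t (fun p => p.2) := by
  rw [PySem.List.sorted_eq_foldl_insertBy, PySem.List.sorted_eq_foldl_insertBy]
  show t.foldl (fun acc x => PySem.List.insertBy pvBef x acc) (PySem.List.insertBy pvBef m []) = _
  show t.foldl (fun acc x => PySem.List.insertBy pvBef x acc) (m :: []) = _
  exact pvFold_head m t h []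

theorem pvSorted_move_front (m : Int × Int) (l1 l2 : List (Int × Int)) (h : ∀ y ∈ l1, m.2 < y.2) :
    PySem.List.sorted (l1 ++ m :: l2) (fun p => p.2)
      = PySem.List.sorted (m :: (l1 ++ l2)) (fun p => p.2) := by
  rw [PySem.List.sorted_eq_foldl_insertBy, PySem.List.sorted_eq_foldl_insertBy]
  show (l1 ++ m :: l2).foldl (fun acc x => PySem.List.insertBy pvBef x acc) [] = _
  show _ = (m :: (l1 ++ l2)).foldl (fun acc x => PySem.List.insertBy pvBef x acc) []
  rw [List.foldl_append]
  simp only [List.foldl_cons, List.foldl_append]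
  rw [← pvIns_hoist m l1 h []]

theorem pvMin?_cons (p : Int × Int) (r : List (Int × Int)) :
    PySem.List.min? (p :: r) (fun q => q.2)
      = some (r.foldl (fun m x => if x.2 < m.2 then x else m) p) := by
  show List.foldl _ (some p) r = _
  induction r generalizing p with
  | nil => rfl
  | cons x t ih =>
    simp only [List.foldl_cons]
    by_cases hx : x.2 < p.2 <;> simp [hx, ih]

theorem pvMin_split (r : List (Int × Int)) : ∀ (p : Int × Int),
    ∃ l1 l2, p :: r = l1 ++ (r.foldl (fun m x => if x.2 < m.2 then x else m) p) :: l2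
      ∧ (∀ y ∈ l1, (r.foldl (fun m x => if x.2 < m.2 then x else m) p).2 < y.2)
      ∧ (∀ y ∈ p :: r, (r.foldl (fun m x => if x.2 < m.2 then x else m) p).2 ≤ y.2) := by
  induction r with
  | nil => intro p; exact ⟨[], [], by simp, by simp, by simp⟩
  | cons b t ih =>
    intro p
    simp only [List.foldl_cons]
    by_cases hb : b.2 < p.2
    · obtain ⟨l1, l2, heq, hstrict, hmin⟩ := ih b
      simp only [if_pos hb]
      refine ⟨p :: l1, l2, by simp [← heq], ?_, ?_⟩
      · intro y hy
        rcases List.mem_cons.mp hy with h | hy2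
        · subst h; exact lt_of_le_of_lt (hmin b (by simp)) hb
        · exact hstrict y hy2
      · intro y hy
        rcases List.mem_cons.mp hy with h | hy2
        · subst h; exact le_of_lt (lt_of_le_of_lt (hmin b (by simp)) hb)
        · exact hmin y hy2
    · obtain ⟨l1, l2, heq, hstrict, hmin⟩ := ih p
      simp only [if_neg hb]
      have hpb : p.2 ≤ b.2 := not_lt.mp hb
      cases l1 with
      | nil =>
        simp only [List.nil_append] at heq
        injection heq with h1 h2
        refine ⟨[], b :: t, by simp [← h1], by simp, ?_⟩
        intro y hy
        rcases List.mem_cons.mp hy with h | hy2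
        · subst h; rw [← h1]
        · rcases List.mem_cons.mp hy2 with h | hy3
          · subst h; rw [← h1]; exact hpb
          · exact hmin y (List.mem_cons_of_mem _ hy3)
      | cons a l1' =>
        simp only [List.cons_append] at heq
        injection heq with hpa htl
        have hFp : (t.foldl (fun m x => if x.2 < m.2 then x else m) p).2 < p.2 := by
          have h0 := hstrict a (by simp)
          rwa [← hpa] at h0
        refine ⟨p :: b :: l1', l2, by (conv_lhs => rw [htl]); rfl, ?_, ?_⟩
        · intro y hy
          rcases List.mem_cons.mp hy with h | hy2
          · subst h; exact hFp
          · rcases List.mem_cons.mp hy2 with h | hy3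
            · subst h; exact lt_of_lt_of_le hFp hpb
            · exact hstrict y (List.mem_cons_of_mem _ hy3)
        · intro y hy
          rcases List.mem_cons.mp hy with h | hy2
          · subst h; exact hmin y (by simp)
          · rcases List.mem_cons.mp hy2 with h | hy3
            · subst h; exact le_trans (hmin p (by simp)) hpb
            · exact hmin y (List.mem_cons_of_mem _ hy3)

theorem pvErase_split (m : Int × Int) (l2 : List (Int × Int)) :
    ∀ l1 : List (Int × Int), (∀ y ∈ l1, m.2 < y.2) → (l1 ++ m :: l2).erase m = l1 ++ l2 := by
  intro l1 h
  have hm : m ∉ l1 := by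
    intro hmem
    exact lt_irrefl _ (h m hmem)
  rw [List.erase_append_right _ hm, List.erase_cons_head]

theorem pvSorted_head_extract (p : Int × Int) (r : List (Int × Int)) :
    PySem.List.sorted (p :: r) (fun q => q.2)
      = (r.foldl (fun m x => if x.2 < m.2 then x else m) p)
        :: PySem.List.sorted ((p :: r).erase (r.foldl (fun m x => if x.2 < m.2 then x else m) p)) (fun q => q.2) := by
  obtain ⟨l1, l2, heq, hstrict, hmin⟩ := pvMin_split r p
  set F := r.foldl (fun m x => if x.2 < m.2 then x else m) p with hF
  have herase : (p :: r).erase F = l1 ++ l2 := by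
    rw [heq]; exact pvErase_split F l2 l1 hstrict
  have hminrest : ∀ y ∈ l1 ++ l2, F.2 ≤ y.2 := by
    intro y hy
    apply hmin
    rw [heq]
    rcases List.mem_append.mp hy with h | h
    · exact List.mem_append.mpr (Or.inl h)
    · exact List.mem_append.mpr (Or.inr (List.mem_cons_of_mem _ h))
  calc PySem.List.sorted (p :: r) (fun q => q.2)
      = PySem.List.sorted (l1 ++ F :: l2) (fun q => q.2) := by rw [← heq]
    _ = PySem.List.sorted (F :: (l1 ++ l2)) (fun q => q.2) := pvSorted_move_front F l1 l2 hstrict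
    _ = F :: PySem.List.sorted (l1 ++ l2) (fun q => q.2) := pvSorted_cons_min F _ hminrest
    _ = F :: PySem.List.sorted ((p :: r).erase F) (fun q => q.2) := by rw [herase]

theorem pvLoopA_eq (s : List Int) : ∀ (acc : List Int) (limit : Nat),
    pvLoopA limit s acc = acc ++ s.take (limit - acc.length) := by
  induction s with
  | nil => intro acc limit; simp [pvLoopA]
  | cons i rest ih =>
    intro acc limit
    by_cases h : acc.length < limit
    · have : limit - acc.length = (limit - (acc.length + 1)) + 1 := by omega
      simp [pvLoopA, h, ih, this]
    · have : limit - acc.length = 0 := by omega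
      simp [pvLoopA, h, this]

theorem pvTake_sorted_eq_pick (k : Nat) : ∀ l : List (Int × Int),
    ((PySem.List.sorted l (fun p => p.2)).take k).map Prod.fst = pvPick k l := by
  induction k with
  | zero => intro l; simp [pvPick]
  | succ k ih =>
    intro l
    cases l with
    | nil => simp [pvPick, PySem.List.sorted]
    | cons p r =>
      rw [pvSorted_head_extract p r]
      simp only [pvPick, pvMin?_cons, List.take_succ_cons, List.map_cons]
      rw [ih]

theorem pvItems_ofList (l : List (Int × Int)) (h : (l.map Prod.fst).Nodup) :
    (PySem.Dict.ofList l).items = l := by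
  show (List.foldl (fun acc p => acc.insert p.1 p.2) PySem.Dict.empty l).items = l
  rw [PySem.Dict.items_foldl_insert_fresh l Prod.fst Prod.snd PySem.Dict.empty
      (fun a _ => by simp [PySem.Dict.contains_empty]) h]
  simp [PySem.Dict.empty]

theorem pvSide (d : List (Int × Int)) (k : Nat) :
    pvLoopA k (PySem.Dict.ofList (PySem.List.sorted (PySem.Dict.ofList d).items (fun item => item.2))).keys []
      = pvPick k (PySem.Dict.ofList d).items := by
  have hnodup : ((PySem.List.sorted (PySem.Dict.ofList d).items (fun item => item.2)).map Prod.fst).Nodup := by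
    have hperm : ((PySem.List.sorted (PySem.Dict.ofList d).items (fun item => item.2)).map Prod.fst).Perm
        ((PySem.Dict.ofList d).items.map Prod.fst) :=
      (PySem.List.sorted_perm (PySem.Dict.ofList d).items (fun item => item.2) false).map Prod.fst
    exact hperm.nodup_iff.mpr (PySem.Dict.nodup_keys_ofList d)
  have hkeys : (PySem.Dict.ofList (PySem.List.sorted (PySem.Dict.ofList d).items (fun item => item.2))).keys
      = (PySem.List.sorted (PySem.Dict.ofList d).items (fun item => item.2)).map Prod.fst := by
    show (PySem.Dict.ofList _).items.map Prod.fst = _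
    rw [pvItems_ofList _ hnodup]
  rw [hkeys, pvLoopA_eq, ← pvTake_sorted_eq_pick]
  simp [List.map_take]

-- ===== VERDICT (by name: the statement is the Claim_ definition above) =====
theorem EuroMoinsRecurent_spec : Claim_equal_EuroMoinsRecurent := by
  intro dicoOccu dicoEtoile _
  show _ = _
  unfold EuroMoinsRecurent EuroMoinsRecurent_alt
  simp only [pvSide]
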